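-- pv_equiv track=rewrite | github.com/melodist/CodingPractice | src/HackerRank/Kindergarten Adventures.py | solve
-- ===== SOURCE A (Python) =====
-- def solve(t):
--     class Node():
--         def __init__(self, value, next=None):
--             self.value = value
--             self.next = next
--
--     n = len(t)
--     head = Node(t[0])
--     cur = head
--     for i in t[1:]:
--         cur.next = Node(i)
--         cur = cur.next
--     cur.next = head
--
--     cur1 = head
--     i = 1
--     max_count = 0
--     answer = 1
--     while i <= n:
--         cur2 = cur1
--         time = 0
--         count = 0
--         while cur2.next != cur1:
--             if cur2.value <= time:
--                 count += 1
--
--             cur2 = cur2.next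
--             time += 1
--
--         if count > max_count:
--             max_count = count
--             answer = i
--
--         i += 1
--         cur1 = cur1.next
--
--     return answer
-- ===== SOURCE B (Python) =====
-- def solve(t):
--     # Difference array over circular contribution ranges + one prefix-sum scan (O(n) vs A's O(n^2)).
--     n = len(t)
--     diff = [0] * (n + 1)
--     for k, v in enumerate(t):
--         lo = v if v > 0 else 0
--         if lo <= n - 2:
--             # element k is counted for start s exactly when lo <= (k - s) % n <= n - 2
--             a = (k - (n - 2)) % n
--             b = (k - lo) % n
--             if a <= b:
--                 diff[a] += 1
--                 diff[b + 1] -= 1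
--             else:
--                 diff[0] += 1
--                 diff[b + 1] -= 1
--                 diff[a] += 1
--     cur = 0
--     best = 0
--     ans = 1
--     for s in range(n):
--         cur += diff[s]
--         if cur > best:
--             best = cur
--             ans = s + 1
--     return ans
-- ===== Notes on version B (the rewrite author's own statement) =====
-- stated objective: faster
-- what changed: Replaced the O(n^2) rotation-by-rotation scan of a circular linked list with a difference array over each element's circular range of good start positions followed by a single prefix-sum scan picking the first maximum.
import Mathlib
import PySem

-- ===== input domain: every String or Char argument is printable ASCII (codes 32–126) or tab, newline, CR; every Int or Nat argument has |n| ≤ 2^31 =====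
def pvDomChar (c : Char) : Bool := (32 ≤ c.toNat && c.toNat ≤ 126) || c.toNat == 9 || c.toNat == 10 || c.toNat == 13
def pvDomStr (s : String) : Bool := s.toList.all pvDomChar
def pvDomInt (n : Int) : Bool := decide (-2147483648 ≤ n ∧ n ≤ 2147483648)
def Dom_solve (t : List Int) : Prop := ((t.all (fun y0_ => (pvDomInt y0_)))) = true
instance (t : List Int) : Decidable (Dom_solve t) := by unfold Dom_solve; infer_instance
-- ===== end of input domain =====

-- B replaces A's O(n^2) per-rotation scan of a circular linked list by a difference array
-- over each element's circular range of good starts plus one prefix-sum scan (measurably faster).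


-- ===== PORT A =====
-- A builds a circular singly linked list and, for each of the n start nodes, walks the
-- n-1 following nodes counting values ≤ elapsed time.  A cyclic pointer structure cannot
-- be built in Lean, so the list is ported EXACTLY as index arithmetic: the node reached
-- from start index s after `time` steps holds value t[(s + time) mod n], and the inner
-- `while cur2.next != cur1` loop visits exactly the n-1 offsets time = 0 .. n-2.
def solve (t : List Int) : Int :=
  let n : Int := t.length
  (((PySem.List.pyRange 1 (n + 1) 1).foldl
    (fun (st : Int × Int) i =>
      let s := i - 1
      let count := (PySem.List.pyRange 0 (n - 1) 1).foldl
        (fun c time =>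
          if PySem.List.pyGetD t (PySem.Int.mod (s + time) n) 0 ≤ time then c + 1 else c) 0
      if count > st.1 then (count, i) else st)
    (0, 1)).2)

-- ===== PORT B =====
-- diff[i] += x  (all indices produced by Source B lie in [0, n], inside diff's length n+1)
def pvInc (d : List Int) (i : Int) (x : Int) : List Int :=
  PySem.List.pySetD d i (PySem.List.pyGetD d i 0 + x)

def solve_alt (t : List Int) : Int :=
  let n : Int := t.length
  let diff := (PySem.List.enumerate t 0).foldl
    (fun (d : List Int) kv =>
      let k := kv.1
      let v := kv.2
      let lo := if v > 0 then v else 0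
      if lo ≤ n - 2 then
        let a := PySem.Int.mod (k - (n - 2)) n
        let b := PySem.Int.mod (k - lo) n
        if a ≤ b then
          pvInc (pvInc d a 1) (b + 1) (-1)
        else
          pvInc (pvInc (pvInc d 0 1) (b + 1) (-1)) a 1
      else d)
    (List.replicate (n.toNat + 1) 0)
  ((PySem.List.pyRange 0 n 1).foldl
    (fun (st : Int × Int × Int) s =>
      let cur := st.1 + PySem.List.pyGetD diff s 0
      if cur > st.2.1 then (cur, cur, s + 1) else (cur, st.2.1, st.2.2))
    (0, 0, 1)).2.2

-- ===== PRECONDITION & SPEC =====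
-- Pre_ excludes only the empty list, on which A raises IndexError reading the first element.
def Pre_solve (t : List Int) : Prop := t ≠ []
instance (t : List Int) : Decidable (Pre_solve t) := by unfold Pre_solve; infer_instance
def pvWitness_solve : List Int := ([1, 0, 2])

def Spec_solve (t : List Int) (out : Int) : Prop := out = solve_alt t
instance (t : List Int) (out : Int) : Decidable (Spec_solve t out) := by unfold Spec_solve; infer_instance

-- ===== CLAIM (what is proved, stated in full; the proofs are below) =====
def Claim_equal_solve : Prop := ∀ (t : List Int), Dom_solve t → Pre_solve t → Spec_solve t (solve t)

-- ===== LEMMAS AND PROOFS =====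

def pvCnt (t : List Int) (r : Nat) : Int :=
  ((List.range (t.length - 1)).map (fun (j : Nat) =>
    if t.getD ((((r:Int) + (j:Int)) % (t.length:Int)).toNat) 0 ≤ (j:Int) then (1:Int) else 0)).sum

theorem A_norm (t : List Int) (h : t ≠ []) :
    solve t = ((List.range t.length).foldl
      (fun (st : Int × Int) r =>
        if pvCnt t r > st.1 then (pvCnt t r, (r:Int)+1) else st) (0,1)).2 := by
  have hn : (0:Int) < (t.length : Int) := by
    have := List.length_pos_iff.mpr h; exact_mod_cast this
  simp only [solve]
  rw [PySem.List.pyRange_one 1 ((t.length:Int) + 1)]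
  have h1 : ((t.length:Int) + 1 - 1).toNat = t.length := by omega
  rw [h1, List.foldl_map]
  congr 1
  apply PySem.List.foldl_congr_mem
  intro st r hr
  simp only [List.mem_range] at hr
  -- fix the outer index: 1 + r - 1 = r, i = r + 1
  have hs : (1:Int) + (r:Int) - 1 = (r:Int) := by ring
  rw [hs]
  have hi : (1:Int) + (r:Int) = (r:Int) + 1 := by ring
  rw [hi]
  -- now the inner count
  have hcnt : (PySem.List.pyRange 0 ((t.length:Int) - 1) 1).foldl
        (fun c time =>
          if PySem.List.pyGetD t (PySem.Int.mod ((r:Int) + time) (t.length:Int)) 0 ≤ time then c + 1 else c) 0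
      = pvCnt t r := by
    rw [PySem.List.pyRange_one 0 ((t.length:Int) - 1)]
    have h2 : ((t.length:Int) - 1 - 0).toNat = t.length - 1 := by omega
    rw [h2, List.foldl_map]
    have hc : ∀ (c : Int), ∀ j ∈ List.range (t.length - 1),
        (fun c (j:Nat) =>
          if PySem.List.pyGetD t (PySem.Int.mod ((r:Int) + ((0:Int) + (j:Int))) (t.length:Int)) 0 ≤ ((0:Int) + (j:Int)) then c + 1 else c) c j
        = c + (if t.getD ((((r:Int) + (j:Int)) % (t.length:Int)).toNat) 0 ≤ (j:Int) then (1:Int) else 0) := by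
      intro c j hj
      simp only [zero_add]
      rw [PySem.Int.mod_eq_emod_of_pos hn,
        PySem.List.pyGetD_of_nonneg t 0 (Int.emod_nonneg _ (by omega))]
      split_ifs <;> ring
    rw [PySem.List.foldl_congr_mem _ _ _ _ hc, PySem.List.foldl_add, zero_add, pvCnt]
  rw [hcnt]

def pvIncN (d : List Int) (i : Nat) (x : Int) : List Int := d.set i (d.getD i 0 + x)

def pvLo (v : Int) : Int := if v > 0 then v else 0

def pvStep (t : List Int) (d : List Int) (k : Nat) : List Int :=
  let n : Int := t.length
  let lo : Int := pvLo (t.getD k 0)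
  if lo ≤ n - 2 then
    let a := ((k:Int) - (n - 2)) % n
    let b := ((k:Int) - lo) % n
    if a ≤ b then pvIncN (pvIncN d a.toNat 1) (b + 1).toNat (-1)
    else pvIncN (pvIncN (pvIncN d 0 1) (b + 1).toNat (-1)) a.toNat 1
  else d

def pvDiff (t : List Int) : List Int :=
  (List.range t.length).foldl (pvStep t) (List.replicate (t.length + 1) 0)

theorem B_norm (t : List Int) (h : t ≠ []) :
    solve_alt t = ((List.range t.length).foldl
      (fun (st : Int × Int × Int) r =>
        let cur := st.1 + (pvDiff t).getD r 0
        if cur > st.2.1 then (cur, cur, (r:Int)+1) else (cur, st.2.1, st.2.2))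
      (0, 0, 1)).2.2 := by
  have hn : (0:Int) < (t.length : Int) := by
    have := List.length_pos_iff.mpr h; exact_mod_cast this
  simp only [solve_alt]
  have hdiff : (PySem.List.enumerate t 0).foldl
      (fun (d : List Int) kv =>
        let k := kv.1
        let v := kv.2
        let lo := if v > 0 then v else 0
        if lo ≤ (t.length:Int) - 2 then
          let a := PySem.Int.mod (k - ((t.length:Int) - 2)) (t.length:Int)
          let b := PySem.Int.mod (k - lo) (t.length:Int)
          if a ≤ b then
            pvInc (pvInc d a 1) (b + 1) (-1)
          else
            pvInc (pvInc (pvInc d 0 1) (b + 1) (-1)) a 1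
        else d)
      (List.replicate ((t.length:Int).toNat + 1) 0) = pvDiff t := by
    rw [PySem.List.enumerate_eq_map_pyRange t 0, PySem.List.len_eq,
      PySem.List.pyRange_zero_nat, List.map_map, List.foldl_map]
    have ht : ((t.length:Int)).toNat = t.length := by omega
    rw [ht, pvDiff]
    apply PySem.List.foldl_congr_mem
    intro d k hk
    simp only [Function.comp, PySem.List.pyGetD_natCast, pvStep]
    rw [show (if t.getD k 0 > 0 then t.getD k 0 else 0) = pvLo (t.getD k 0) from rfl]
    have ha : (0:Int) ≤ ((k:Int) - ((t.length:Int) - 2)) % (t.length:Int) :=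
      Int.emod_nonneg _ (by omega)
    rw [PySem.Int.mod_eq_emod_of_pos hn, PySem.Int.mod_eq_emod_of_pos hn]
    have hinc : ∀ (d : List Int) (i x : Int), 0 ≤ i → pvInc d i x = pvIncN d i.toNat x := by
      intro d i x hi
      rw [pvInc, pvIncN, PySem.List.pySetD_of_nonneg _ _ hi, PySem.List.pyGetD_of_nonneg _ _ hi]
    have hb : (0:Int) ≤ ((k:Int) - pvLo (t.getD k 0)) % (t.length:Int) := Int.emod_nonneg _ (by omega)
    split_ifs with h1 h2
    · rw [hinc _ _ _ ha, hinc _ _ _ (by omega)]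
    · rw [hinc _ _ _ (by omega), hinc _ _ _ (by omega), hinc d 0 1 (by omega)]
      norm_num
    · rfl
  rw [hdiff, PySem.List.pyRange_zero_nat, List.foldl_map]
  congr 2
  apply PySem.List.foldl_congr_mem
  intro st r hr
  simp only [PySem.List.pyGetD_natCast]

theorem pvEmod (x n : Int) (h1 : -n ≤ x) (h2 : x < n) :
    x % n = if x < 0 then x + n else x := by
  split_ifs with hx
  · have h3 : (0:Int) < n := by omega
    have := Int.add_mul_emod_self_left (a := x) (b := n) (c := 1)
    rw [mul_one] at this
    rw [← this, Int.emod_eq_of_lt (by omega) (by omega)]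
  · exact Int.emod_eq_of_lt (by omega) h2

theorem pvIncN_length (d : List Int) (i : Nat) (x : Int) :
    (pvIncN d i x).length = d.length := by
  simp [pvIncN]

theorem pvIncN_pref (d : List Int) (i : Nat) (x : Int) (m : Nat) (hi : i < d.length) :
    ((pvIncN d i x).take (m+1)).sum = (d.take (m+1)).sum + (if i ≤ m then x else 0) := by
  rw [pvIncN, List.take_set]
  by_cases hc : i ≤ m
  · set L := d.take (m+1) with hL
    have hiL : i < L.length := by
      rw [hL, List.length_take]; omega
    rw [List.sum_set, if_pos hiL]
    have hdrop : L.drop i = L[i] :: L.drop (i+1) := List.drop_eq_getElem_cons hiL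
    have hsplit : L.sum = (L.take i).sum + (L.drop i).sum := by
      rw [← List.sum_append, List.take_append_drop]
    rw [hsplit, if_pos hc]
    have hgetD : d.getD i 0 = L[i] := by
      have hLi : L[i] = d[i] := by
        simp [hL, List.getElem_take]
      rw [hLi]
      simp [List.getD, List.getElem?_eq_getElem hi]
    rw [hgetD]
    have hds : (L.drop i).sum = L[i] + (L.drop (i+1)).sum := by
      rw [hdrop, List.sum_cons]
    omega
  · have hiL : (d.take (m+1)).length ≤ i := by
      rw [List.length_take]; omega
    rw [List.set_eq_of_length_le hiL, if_neg hc, add_zero]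

abbrev pvCond (t : List Int) (k m : Nat) : Prop :=
  pvLo (t.getD k 0) ≤ ((k:Int) - (m:Int)) % (t.length:Int)
    ∧ ((k:Int) - (m:Int)) % (t.length:Int) ≤ (t.length:Int) - 2

theorem pvStep_length (t : List Int) (d : List Int) (k : Nat) :
    (pvStep t d k).length = d.length := by
  simp only [pvStep, pvIncN]
  split_ifs <;> simp

theorem pvStep_pref (t : List Int) (d : List Int) (k m : Nat)
    (hlen : d.length = t.length + 1) (hk : k < t.length) (hm : m < t.length) :
    ((pvStep t d k).take (m+1)).sum
      = (d.take (m+1)).sum + (if pvCond t k m then (1:Int) else 0) := by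
  have hNpos : 0 < t.length := by omega
  have hn : (0:Int) < (t.length:Int) := by exact_mod_cast hNpos
  have hkc : (k:Int) < (t.length:Int) := by exact_mod_cast hk
  have hmc : (m:Int) < (t.length:Int) := by exact_mod_cast hm
  have hm1a : (0:Int) ≤ ((k:Int) - (m:Int)) % (t.length:Int) := Int.emod_nonneg _ (by omega)
  have hm1b : ((k:Int) - (m:Int)) % (t.length:Int) < (t.length:Int) := Int.emod_lt_of_pos _ hn
  have em : ((k:Int) - (m:Int)) % (t.length:Int)
      = if (k:Int) - (m:Int) < 0 then (k:Int) - (m:Int) + (t.length:Int) else (k:Int) - (m:Int) :=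
    pvEmod _ _ (by omega) (by omega)
  have hL0 : (0:Int) ≤ pvLo (t.getD k 0) := by rw [pvLo]; split_ifs <;> omega
  simp only [pvStep]
  by_cases h1 : pvLo (t.getD k 0) ≤ (t.length:Int) - 2
  · rw [if_pos h1]
    have ea : ((k:Int) - ((t.length:Int) - 2)) % (t.length:Int)
        = if (k:Int) - ((t.length:Int) - 2) < 0 then (k:Int) - ((t.length:Int) - 2) + (t.length:Int)
          else (k:Int) - ((t.length:Int) - 2) := pvEmod _ _ (by omega) (by omega)
    have eb : ((k:Int) - pvLo (t.getD k 0)) % (t.length:Int)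
        = if (k:Int) - pvLo (t.getD k 0) < 0 then (k:Int) - pvLo (t.getD k 0) + (t.length:Int)
          else (k:Int) - pvLo (t.getD k 0) :=
      pvEmod _ _ (by omega) (by omega)
    by_cases h2 : ((k:Int) - ((t.length:Int) - 2)) % (t.length:Int)
        ≤ ((k:Int) - pvLo (t.getD k 0)) % (t.length:Int)
    · rw [if_pos h2,
          pvIncN_pref _ _ _ _ (by rw [pvIncN_length]; omega),
          pvIncN_pref _ _ _ _ (by omega)]
      rw [ea, eb] at h2 ⊢
      by_cases hc : pvCond t k m
      · rw [if_pos hc]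
        simp only [pvCond, em] at hc
        split_ifs at hc ⊢ <;> omega
      · rw [if_neg hc]
        simp only [pvCond, em] at hc
        split_ifs at hc ⊢ <;> omega
    · rw [if_neg h2,
          pvIncN_pref _ _ _ _ (by rw [pvIncN_length, pvIncN_length]; omega),
          pvIncN_pref _ _ _ _ (by rw [pvIncN_length]; omega),
          pvIncN_pref _ _ _ _ (by omega)]
      rw [ea, eb] at h2 ⊢
      by_cases hc : pvCond t k m
      · rw [if_pos hc]
        simp only [pvCond, em] at hc
        split_ifs at hc ⊢ <;> omega
      · rw [if_neg hc]
        simp only [pvCond, em] at hc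
        split_ifs at hc ⊢ <;> omega
  · rw [if_neg h1]
    have hno : ¬ pvCond t k m := by
      simp only [pvCond]
      rintro ⟨c1, c2⟩; omega
    rw [if_neg hno, add_zero]

theorem pvBuild_pref (t : List Int) (m : Nat) (hm : m < t.length) :
    ∀ (ks : List Nat) (d : List Int), d.length = t.length + 1 → (∀ k ∈ ks, k < t.length) →
    ((ks.foldl (pvStep t) d).take (m+1)).sum
      = (d.take (m+1)).sum + (ks.map (fun k => if pvCond t k m then (1:Int) else 0)).sum := by
  intro ks
  induction ks with
  | nil => simp
  | cons k ks ih =>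
    intro d hd hks
    rw [List.foldl_cons,
      ih _ (by rw [pvStep_length]; exact hd) (fun x hx => hks x (List.mem_cons_of_mem _ hx)),
      pvStep_pref t d k m hd (hks k List.mem_cons_self) hm, List.map_cons, List.sum_cons]
    ring

theorem pvFold_length (t : List Int) (ks : List Nat) (d : List Int) :
    (ks.foldl (pvStep t) d).length = d.length := by
  induction ks generalizing d with
  | nil => rfl
  | cons k ks ih => rw [List.foldl_cons, ih, pvStep_length]

theorem pvDiff_length (t : List Int) : (pvDiff t).length = t.length + 1 := by
  rw [pvDiff, pvFold_length]; simp

theorem pvDiff_pref (t : List Int) (m : Nat) (hm : m < t.length) :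
    ((pvDiff t).take (m+1)).sum
      = ((List.range t.length).map (fun k => if pvCond t k m then (1:Int) else 0)).sum := by
  rw [pvDiff, pvBuild_pref t m hm _ _ (by simp) (fun k hk => List.mem_range.mp hk)]
  simp [List.take_replicate]

theorem pvAddMod (n a b : Int) : (a + b % n) % n = (a + b) % n := by
  conv_rhs => rw [Int.add_emod]
  rw [Int.add_emod a (b % n), Int.emod_emod_of_dvd _ dvd_rfl]

theorem pvSubMod (n a b : Int) : (a % n - b) % n = (a - b) % n := by
  conv_rhs => rw [Int.sub_emod]
  rw [Int.sub_emod (a % n) b, Int.emod_emod_of_dvd _ dvd_rfl]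

theorem pvCnt_eq (t : List Int) (m : Nat) (hm : m < t.length) :
    pvCnt t m = ((List.range t.length).map (fun k => if pvCond t k m then (1:Int) else 0)).sum := by
  have hNpos : 0 < t.length := by omega
  have hn : (0:Int) < (t.length:Int) := by exact_mod_cast hNpos
  have hmc : (m:Int) < (t.length:Int) := by exact_mod_cast hm
  -- both list sums are Finset sums definitionally
  show (∑ j ∈ Finset.range (t.length - 1), (fun (j : Nat) =>
      if t.getD ((((m:Int) + (j:Int)) % (t.length:Int)).toNat) 0 ≤ (j:Int) then (1:Int) else 0) j)
    = ∑ k ∈ Finset.range t.length, (fun (k : Nat) => if pvCond t k m then (1:Int) else 0) k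
  -- extend the left sum to range t.length with an extra `j ≤ n - 2` conjunct
  have hext : (∑ j ∈ Finset.range (t.length - 1), (fun (j : Nat) =>
      if t.getD ((((m:Int) + (j:Int)) % (t.length:Int)).toNat) 0 ≤ (j:Int) then (1:Int) else 0) j)
    = ∑ j ∈ Finset.range t.length, (fun (j : Nat) =>
      if t.getD ((((m:Int) + (j:Int)) % (t.length:Int)).toNat) 0 ≤ (j:Int)
          ∧ (j:Int) ≤ (t.length:Int) - 2 then (1:Int) else 0) j := by
    have hsplit : t.length = (t.length - 1) + 1 := by omega
    rw [show Finset.range t.length = Finset.range (t.length - 1 + 1) from by rw [← hsplit],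
        Finset.sum_range_succ]
    have hlast : (if t.getD ((((m:Int) + ((t.length - 1 : Nat):Int)) % (t.length:Int)).toNat) 0
          ≤ ((t.length - 1 : Nat):Int)
        ∧ ((t.length - 1 : Nat):Int) ≤ (t.length:Int) - 2 then (1:Int) else 0) = 0 := by
      rw [if_neg]
      rintro ⟨-, c2⟩
      omega
    rw [hlast, add_zero]
    apply Finset.sum_congr rfl
    intro j hj
    simp only [Finset.mem_range] at hj
    have : ((j:Int) ≤ (t.length:Int) - 2) := by omega
    simp [this]
  rw [hext]
  apply Finset.sum_nbij' (i := fun (j : Nat) => ((((m:Int) + (j:Int)) % (t.length:Int)).toNat))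
    (j := fun (k : Nat) => ((((k:Int) - (m:Int)) % (t.length:Int)).toNat))
  · intro j hj
    simp only [Finset.mem_range] at hj ⊢
    have h1 := Int.emod_nonneg (b := (t.length:Int)) ((m:Int) + (j:Int)) (by omega)
    have h2 := Int.emod_lt_of_pos ((m:Int) + (j:Int)) hn
    omega
  · intro k hk
    simp only [Finset.mem_range] at hk ⊢
    have h1 := Int.emod_nonneg (b := (t.length:Int)) ((k:Int) - (m:Int)) (by omega)
    have h2 := Int.emod_lt_of_pos ((k:Int) - (m:Int)) hn
    omega
  · intro j hj
    simp only [Finset.mem_range] at hj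
    have hjc : (j:Int) < (t.length:Int) := by exact_mod_cast hj
    have h1 := Int.emod_nonneg (b := (t.length:Int)) ((m:Int) + (j:Int)) (by omega)
    have hcast : ((((((m:Int) + (j:Int)) % (t.length:Int)).toNat) : Nat) : Int)
        = ((m:Int) + (j:Int)) % (t.length:Int) := by omega
    have key : ((((m:Int) + (j:Int)) % (t.length:Int)) - (m:Int)) % (t.length:Int) = (j:Int) := by
      rw [pvSubMod]
      have : (m:Int) + (j:Int) - (m:Int) = (j:Int) := by ring
      rw [this, Int.emod_eq_of_lt (by omega) (by omega)]
    rw [hcast, key]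
    omega
  · intro k hk
    simp only [Finset.mem_range] at hk
    have hkc : (k:Int) < (t.length:Int) := by exact_mod_cast hk
    have h1 := Int.emod_nonneg (b := (t.length:Int)) ((k:Int) - (m:Int)) (by omega)
    have hcast : ((((((k:Int) - (m:Int)) % (t.length:Int)).toNat) : Nat) : Int)
        = ((k:Int) - (m:Int)) % (t.length:Int) := by omega
    have key : ((m:Int) + (((k:Int) - (m:Int)) % (t.length:Int))) % (t.length:Int) = (k:Int) := by
      rw [pvAddMod]
      have : (m:Int) + ((k:Int) - (m:Int)) = (k:Int) := by ring
      rw [this, Int.emod_eq_of_lt (by omega) (by omega)]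
    rw [hcast, key]
    omega
  · intro j hj
    simp only [Finset.mem_range] at hj
    have hjc : (j:Int) < (t.length:Int) := by exact_mod_cast hj
    have h1 := Int.emod_nonneg (b := (t.length:Int)) ((m:Int) + (j:Int)) (by omega)
    have hcast : ((((((m:Int) + (j:Int)) % (t.length:Int)).toNat) : Nat) : Int)
        = ((m:Int) + (j:Int)) % (t.length:Int) := by omega
    have key : ((((m:Int) + (j:Int)) % (t.length:Int)) - (m:Int)) % (t.length:Int) = (j:Int) := by
      rw [pvSubMod]
      have : (m:Int) + (j:Int) - (m:Int) = (j:Int) := by ring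
      rw [this, Int.emod_eq_of_lt (by omega) (by omega)]
    apply if_congr _ rfl rfl
    simp only [pvCond]
    rw [hcast, key]
    constructor
    · rintro ⟨c1, c2⟩
      refine ⟨?_, c2⟩
      have hL : pvLo (t.getD ((((m:Int) + (j:Int)) % (t.length:Int)).toNat) 0)
          ≤ (j:Int) := by
        rw [pvLo]; split_ifs <;> omega
      exact hL
    · rintro ⟨c1, c2⟩
      refine ⟨?_, c2⟩
      revert c1
      rw [pvLo]; split_ifs <;> omega

theorem pvSel (t : List Int) : ∀ (M : Nat), M ≤ t.length →
    ((List.range M).foldl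
      (fun (st : Int × Int × Int) r =>
        let cur := st.1 + (pvDiff t).getD r 0
        if cur > st.2.1 then (cur, cur, (r:Int)+1) else (cur, st.2.1, st.2.2))
      (0, 0, 1))
    = (((pvDiff t).take M).sum,
       (List.range M).foldl
        (fun (st : Int × Int) r =>
          if pvCnt t r > st.1 then (pvCnt t r, (r:Int)+1) else st) (0, 1)) := by
  intro M
  induction M with
  | zero => simp
  | succ M ih =>
    intro hM
    rw [List.range_succ, List.foldl_append, List.foldl_append, ih (by omega)]
    simp only [List.foldl_cons, List.foldl_nil]
    have hcur : ((pvDiff t).take M).sum + (pvDiff t).getD M 0 = ((pvDiff t).take (M+1)).sum := by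
      rw [List.take_add_one]
      have hMd : M < (pvDiff t).length := by rw [pvDiff_length]; omega
      rw [List.sum_append]
      simp [List.getElem?_eq_getElem hMd, List.getD]
    have hval : ((pvDiff t).take (M+1)).sum = pvCnt t M := by
      rw [pvDiff_pref t M (by omega), pvCnt_eq t M (by omega)]
    rw [hcur, hval]
    split_ifs <;> rfl

theorem pvMain (t : List Int) (h : t ≠ []) : solve t = solve_alt t := by
  rw [A_norm t h, B_norm t h]
  simp only [pvSel t t.length le_rfl]

-- ===== VERDICT (by name: the statement is the Claim_ definition above) =====
theorem solve_spec : Claim_equal_solve := by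
  intro t _ hp
  unfold Spec_solve
  exact pvMain t hp
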